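-- pv_equiv track=rewrite | github.com/johnshizhu/jz-bioalgorithms | suffix_array_bwt/suffix_array_bwt.py | mergeBWT
-- ===== SOURCE A (Python) =====
-- def mergeBWT(bwt1, bwt2):
--     interleave = [(c, 0) for c in bwt1] + [(c, 1) for c in bwt2]
--     passes = min(len(bwt1), len(bwt2))
--     for p in range(passes):
--         i, j = 0, 0
--         nextInterleave = []
--         for c, k in sorted(interleave, key=lambda x: x[0]):
--             if (k == 0):
--                 b = bwt1[i]
--                 i += 1
--             else:
--                 b = bwt2[j]
--                 j += 1
--             nextInterleave.append((b, k))
--         if (nextInterleave == interleave):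
--             break
--         interleave = nextInterleave
--     return ''.join([c for c, k in interleave])
-- ===== SOURCE B (Python) =====
-- def mergeBWT(bwt1, bwt2):
--     # Occurrence-index merge: build once, per character, the ordinal lists of its
--     # occurrences in each input; each refinement pass then two-pointer-merges, per
--     # character, the current positions of those ordinals -- no per-pass sort and no
--     # per-pass re-bucketing of characters; the state is just the 0/1 flag sequence.
--     alphabet = sorted(set(bwt1 + bwt2))
--     occ1 = [[i for i, x in enumerate(bwt1) if x == c] for c in alphabet]
--     occ2 = [[j for j, x in enumerate(bwt2) if x == c] for c in alphabet]
--     flags = [0] * len(bwt1) + [1] * len(bwt2)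
--     for _ in range(min(len(bwt1), len(bwt2))):
--         pos1, pos2 = [], []
--         for t, k in enumerate(flags):
--             (pos2 if k else pos1).append(t)
--         new = []
--         for zs, os in zip(occ1, occ2):
--             a = b = 0
--             while a < len(zs) and b < len(os):
--                 if pos1[zs[a]] < pos2[os[b]]:
--                     new.append(0)
--                     a += 1
--                 else:
--                     new.append(1)
--                     b += 1
--             new.extend([0] * (len(zs) - a))
--             new.extend([1] * (len(os) - b))
--         if new == flags:
--             break
--         flags = new
--     out = []
--     i = j = 0
--     for k in flags:
--         if k:
--             out.append(bwt2[j])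
--             j += 1
--         else:
--             out.append(bwt1[i])
--             i += 1
--     return ''.join(out)
-- ===== Notes on version B (the rewrite author's own statement) =====
-- stated objective: faster
-- what changed: B drops the per-pass stable sort of (char,flag) pairs entirely: it builds a per-character occurrence-ordinal index of each input once before the loop, keeps only the 0/1 flag sequence as state, and each pass produces the new flag sequence by a two-pointer merge, per character in alphabet order, of the current positions of those precomputed ordinals.
import Mathlib
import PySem

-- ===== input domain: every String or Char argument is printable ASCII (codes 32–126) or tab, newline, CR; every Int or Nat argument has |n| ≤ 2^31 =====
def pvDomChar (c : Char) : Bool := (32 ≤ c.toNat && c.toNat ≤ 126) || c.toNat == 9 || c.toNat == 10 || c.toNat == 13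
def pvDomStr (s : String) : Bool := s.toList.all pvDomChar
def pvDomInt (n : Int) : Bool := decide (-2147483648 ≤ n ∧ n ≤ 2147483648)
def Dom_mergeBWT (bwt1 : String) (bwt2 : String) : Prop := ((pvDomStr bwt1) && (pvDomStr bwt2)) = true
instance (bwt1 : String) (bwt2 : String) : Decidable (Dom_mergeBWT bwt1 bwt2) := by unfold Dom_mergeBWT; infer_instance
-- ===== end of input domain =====

-- B replaces A's per-pass stable sort of (char,flag) pairs by a per-character occurrence
-- index built once, keeping only the 0/1 flag sequence as state (faster).

-- ===== PORT A =====
-- One refinement pass of A: sort the interleave stably by character, then walk it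
-- consuming bwt1 for flag 0 and bwt2 for flag 1.  The index i (resp. j) is always in
-- range because the number of 0-flags (resp. 1-flags) is invariant, so the ' ' default
-- of pyGetD is never produced (Python's bwt1[i] never raises here).
def stepA (l1 l2 : List Char) (interleave : List (Char × Int)) : List (Char × Int) :=
  ((PySem.List.sorted interleave (fun x => x.1) false).foldl
    (fun (st : Nat × Nat × List (Char × Int)) ck =>
      if ck.2 == 0 then
        (st.1 + 1, st.2.1, st.2.2 ++ [(PySem.List.pyGetD l1 (Int.ofNat st.1) ' ', ck.2)])
      else
        (st.1, st.2.1 + 1, st.2.2 ++ [(PySem.List.pyGetD l2 (Int.ofNat st.2.1) ' ', ck.2)]))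
    (0, 0, [])).2.2

-- 'for p in range(passes)' with the 'break' on reaching a fixpoint
def loopA (l1 l2 : List Char) : Nat → List (Char × Int) → List (Char × Int)
  | 0, interleave => interleave
  | p + 1, interleave =>
      let next := stepA l1 l2 interleave
      if next = interleave then interleave else loopA l1 l2 p next

def mergeBWT (bwt1 : String) (bwt2 : String) : String :=
  let l1 := bwt1.toList
  let l2 := bwt2.toList
  let interleave := l1.map (fun c => (c, (0 : Int))) ++ l2.map (fun c => (c, (1 : Int)))
  let passes := min l1.length l2.length
  String.ofList ((loopA l1 l2 passes interleave).map (fun x => x.1))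

-- ===== PORT B =====
-- The while-loop over one character bucket plus the two trailing extends: the pointers
-- a and b advancing into zs/os are ported as consuming the lists.  The positions zs/os
-- index into ps/qs are always in range (each ordinal of the character occurs in the flag
-- sequence), so the 0 default of pyGetD is never produced (Python's pos1[zs[a]] never raises).
def mergeC (ps qs : List Int) : List Int → List Int → List Int
  | [], os => List.replicate os.length 1
  | zs, [] => List.replicate zs.length 0
  | a :: zs, b :: os =>
      if PySem.List.pyGetD ps a 0 < PySem.List.pyGetD qs b 0 then
        0 :: mergeC ps qs zs (b :: os)
      else
        1 :: mergeC ps qs (a :: zs) os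
termination_by zs os => zs.length + os.length

-- one pass of Source B: collect the current positions of the 0-flags and of the 1-flags
-- ('if k' on a 0/1 int is 'k ≠ 0', ported as the same two branches), then merge bucket
-- by bucket in alphabet order
def passB (occ1 occ2 : List (List Int)) (flags : List Int) : List Int :=
  let pr := (PySem.List.enumerate flags 0).foldl
    (fun (pr : List Int × List Int) tk =>
      if tk.2 == 0 then (pr.1 ++ [tk.1], pr.2) else (pr.1, pr.2 ++ [tk.1]))
    ([], [])
  (occ1.zip occ2).foldl (fun acc zo => acc ++ mergeC pr.1 pr.2 zo.1 zo.2) []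

def loopB (occ1 occ2 : List (List Int)) : Nat → List Int → List Int
  | 0, flags => flags
  | p + 1, flags =>
      let new := passB occ1 occ2 flags
      if new = flags then flags else loopB occ1 occ2 p new

-- the final expansion loop ('if k' again means 'k ≠ 0'); indices in range as above
def expandB (l1 l2 : List Char) (flags : List Int) : List Char :=
  (flags.foldl
    (fun (st : List Char × Nat × Nat) k =>
      if k == 0 then
        (st.1 ++ [PySem.List.pyGetD l1 (Int.ofNat st.2.1) ' '], st.2.1 + 1, st.2.2)
      else
        (st.1 ++ [PySem.List.pyGetD l2 (Int.ofNat st.2.2) ' '], st.2.1, st.2.2 + 1))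
    ([], 0, 0)).1

def mergeBWT_alt (bwt1 : String) (bwt2 : String) : String :=
  let l1 := bwt1.toList
  let l2 := bwt2.toList
  let alphabet := PySem.List.sorted (PySem.Set.ofList (l1 ++ l2)) (fun x => x) false
  let occ1 := alphabet.map (fun c => ((PySem.List.enumerate l1 0).filter (fun p => p.2 == c)).map (fun p => p.1))
  let occ2 := alphabet.map (fun c => ((PySem.List.enumerate l2 0).filter (fun p => p.2 == c)).map (fun p => p.1))
  let flags := List.replicate l1.length (0 : Int) ++ List.replicate l2.length (1 : Int)
  String.ofList (expandB l1 l2 (loopB occ1 occ2 (min l1.length l2.length) flags))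

-- ===== PRECONDITION & SPEC =====
def Spec_mergeBWT (bwt1 : String) (bwt2 : String) (out : String) : Prop := out = mergeBWT_alt bwt1 bwt2
instance (bwt1 : String) (bwt2 : String) (out : String) : Decidable (Spec_mergeBWT bwt1 bwt2 out) := by unfold Spec_mergeBWT; infer_instance

-- ===== CLAIM (what is proved, stated in full; the proofs are below) =====
def Claim_equal_mergeBWT : Prop := ∀ (bwt1 : String) (bwt2 : String), Dom_mergeBWT bwt1 bwt2 → Spec_mergeBWT bwt1 bwt2 (mergeBWT bwt1 bwt2)

-- ===== LEMMAS AND PROOFS =====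

-- the canonical interleave determined by a flag sequence: flag 0 consumes the next
-- character of l1, anything else the next character of l2
def canonW (l1 l2 : List Char) : List Int → Nat → Nat → List (Char × Int)
  | [], _, _ => []
  | k :: f, i, j =>
      if k == 0 then (PySem.List.pyGetD l1 (Int.ofNat i) ' ', k) :: canonW l1 l2 f (i + 1) j
      else (PySem.List.pyGetD l2 (Int.ofNat j) ' ', k) :: canonW l1 l2 f i (j + 1)

-- positions (from offset t) of the flags equal to b
def posG (b : Int) : List Int → Int → List Int
  | [], _ => []
  | k :: f, t => if k == b then t :: posG b f (t + 1) else posG b f (t + 1)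

-- positions (from offset t) of the b-flags whose consumed character (from l, counter i) is c
def sel (l : List Char) (c : Char) (b : Int) : List Int → Nat → Int → List Int
  | [], _, _ => []
  | k :: f, i, t =>
      if k == b then
        (if PySem.List.pyGetD l (Int.ofNat i) ' ' == c then t :: sel l c b f (i + 1) (t + 1)
         else sel l c b f (i + 1) (t + 1))
      else sel l c b f i (t + 1)

-- occurrence ordinals of c in l, numbered from s
def occA (c : Char) : List Char → Int → List Int
  | [], _ => []
  | x :: l, s => if x == c then s :: occA c l (s + 1) else occA c l (s + 1)

theorem canonW_cons_zero (l1 l2 : List Char) (f : List Int) (i j : Nat) :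
    canonW l1 l2 ((0 : Int) :: f) i j
      = (PySem.List.pyGetD l1 (Int.ofNat i) ' ', (0 : Int)) :: canonW l1 l2 f (i + 1) j := by
  simp [canonW]

theorem canonW_cons_one (l1 l2 : List Char) (f : List Int) (i j : Nat) :
    canonW l1 l2 ((1 : Int) :: f) i j
      = (PySem.List.pyGetD l2 (Int.ofNat j) ' ', (1 : Int)) :: canonW l1 l2 f i (j + 1) := by
  simp [canonW]

theorem pyGetD_natAt (l : List Char) (i : Nat) (h : i < l.length) :
    PySem.List.pyGetD l (Int.ofNat i) ' ' = l[i] := by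
  rw [show Int.ofNat i = ((i : Nat) : Int) from rfl, PySem.List.pyGetD_natCast,
    List.getD_eq_getElem _ _ h]

-- plain two-pointer merge of two position lists, emitting the side flags
def mergeVals : List Int → List Int → List Int
  | [], os => List.replicate os.length 1
  | zs, [] => List.replicate zs.length 0
  | x :: zs, y :: os =>
      if x < y then 0 :: mergeVals zs (y :: os) else 1 :: mergeVals (x :: zs) os
termination_by zs os => zs.length + os.length

-- the loop invariant: flags are 0/1 with the fixed multiplicities
def FlagInv (n1 n2 : Nat) (f : List Int) : Prop :=
  (∀ k ∈ f, k = 0 ∨ k = 1) ∧ f.count 0 = n1 ∧ f.count 1 = n2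

theorem char_lt_iff (a b : Char) : a < b ↔ a.toNat < b.toNat := by
  constructor <;> intro h
  · exact h
  · exact h

theorem toNat_ofNat_lt {n : Nat} (h : n < 256) : (Char.ofNat n).toNat = n := by
  have : n.isValidChar := by left; omega
  simp [Char.ofNat, this, Char.ofNatAux, Char.toNat]

-- the bucket-concatenation view of the sorted interleave
def pvF (l : List (Char × Int)) : List (Char × Int) :=
  (List.range 256).flatMap (fun n => l.filter (fun x => x.1.toNat == n))

theorem pvF_nil : pvF [] = [] := by
  simp [pvF]

theorem insertBy_split {α : Type} (before : α → α → Bool) (x : α) (A B : List α)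
    (hA : ∀ a ∈ A, before x a = false) (hB : ∀ b ∈ B, before x b = true) :
    PySem.List.insertBy before x (A ++ B) = A ++ x :: B := by
  induction A with
  | nil =>
      cases B with
      | nil => simp [PySem.List.insertBy]
      | cons b bs => simp [PySem.List.insertBy, hB b (by simp)]
  | cons a as ih =>
      have ha : before x a = false := hA a (by simp)
      simp only [List.cons_append, PySem.List.insertBy, ha, Bool.false_eq_true, if_false]
      have := ih (fun a h => hA a (by simp [h]))
      simp [this]

theorem pvF_snoc (l : List (Char × Int)) (x : Char × Int) (hx : x.1.toNat < 256) :
    PySem.List.insertBy (fun a b => decide ((fun y => y.1) a < (fun y => y.1) b)) x (pvF l)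
      = pvF (l ++ [x]) := by
  set c := x.1.toNat with hc
  have hsplit : List.range 256 = List.range (c + 1) ++ (List.range 256).drop (c + 1) := by
    have h := (List.take_append_drop (c + 1) (List.range 256)).symm
    rw [List.take_range, min_eq_left (by omega)] at h
    exact h
  have hLo : ∀ a ∈ (List.range (c + 1)).flatMap (fun n => l.filter (fun y => y.1.toNat == n)),
      (decide (x.1 < a.1)) = false := by
    intro a ha
    simp only [List.mem_flatMap, List.mem_range, List.mem_filter] at ha
    obtain ⟨n, hn, _, he⟩ := ha
    have : a.1.toNat = n := by simpa using he
    simp only [decide_eq_false_iff_not, char_lt_iff]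
    omega
  have hHi : ∀ a ∈ ((List.range 256).drop (c + 1)).flatMap (fun n => l.filter (fun y => y.1.toNat == n)),
      (decide (x.1 < a.1)) = true := by
    intro a ha
    simp only [List.mem_flatMap, List.mem_filter] at ha
    obtain ⟨n, hn, _, he⟩ := ha
    have hnn : c + 1 ≤ n := by
      obtain ⟨i, hi, rfl⟩ := List.mem_drop_iff_getElem.mp hn
      simp only [List.getElem_range]
      omega
    have : a.1.toNat = n := by simpa using he
    simp only [decide_eq_true_eq, char_lt_iff]
    omega
  have h1 : pvF l = (List.range (c + 1)).flatMap (fun n => l.filter (fun y => y.1.toNat == n))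
      ++ ((List.range 256).drop (c + 1)).flatMap (fun n => l.filter (fun y => y.1.toNat == n)) := by
    rw [pvF]
    conv_lhs => rw [hsplit]
    rw [List.flatMap_append]
  have hfil : ∀ n, (l ++ [x]).filter (fun y => y.1.toNat == n)
      = l.filter (fun y => y.1.toNat == n) ++ (if c = n then [x] else []) := by
    intro n
    rw [List.filter_append]
    congr 1
    by_cases h : c = n
    · have hb : (x.1.toNat == n) = true := by simpa [← hc] using h
      rw [if_pos h]
      simp [List.filter, hb]
    · have hb : (x.1.toNat == n) = false := by simpa [← hc] using h
      rw [if_neg h]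
      simp [List.filter, hb]
  have h2 : pvF (l ++ [x]) = (List.range (c + 1)).flatMap (fun n => l.filter (fun y => y.1.toNat == n))
      ++ [x] ++ ((List.range 256).drop (c + 1)).flatMap (fun n => l.filter (fun y => y.1.toNat == n)) := by
    rw [pvF]
    conv_lhs => rw [hsplit]
    rw [List.flatMap_append]
    congr 1
    · rw [List.range_succ, List.flatMap_append, List.flatMap_append]
      simp only [List.flatMap_cons, List.flatMap_nil, List.append_nil]
      rw [List.append_assoc]
      congr 1
      · apply List.flatMap_congr
        intro n hn
        rw [hfil n]
        have : c ≠ n := by simp only [List.mem_range] at hn; omega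
        simp [this]
      · rw [hfil c]; simp
    · apply List.flatMap_congr
      intro n hn
      rw [hfil n]
      have hnn : c + 1 ≤ n := by
        obtain ⟨i, hi, rfl⟩ := List.mem_drop_iff_getElem.mp hn
        simp only [List.getElem_range]; omega
      have : c ≠ n := by omega
      simp [this]
  rw [h1, insertBy_split _ _ _ _ hLo hHi, h2]
  simp

theorem sorted_eq_pvF (l : List (Char × Int)) (h : ∀ x ∈ l, x.1.toNat < 256) :
    PySem.List.sorted l (fun x => x.1) false = pvF l := by
  rw [PySem.List.sorted_eq_foldl_insertBy]
  suffices H : ∀ (l p : List (Char × Int)), (∀ x ∈ l, x.1.toNat < 256) →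
      l.foldl (fun acc x => PySem.List.insertBy (fun a b => decide ((fun y => y.1) a < (fun y => y.1) b)) x acc) (pvF p)
        = pvF (p ++ l) by
    have := H l [] h
    simpa only [pvF_nil, List.nil_append] using this
  intro l
  induction l with
  | nil => intro p _; simp
  | cons x xs ih =>
      intro p hall
      simp only [List.foldl_cons]
      rw [pvF_snoc p x (hall x (by simp))]
      rw [ih (p ++ [x]) (fun y hy => hall y (by simp [hy]))]
      simp

theorem map_snd_canonW (l1 l2 : List Char) :
    ∀ (f : List Int) (i j : Nat), (canonW l1 l2 f i j).map (fun x => x.2) = f := by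
  intro f
  induction f with
  | nil => intro i j; rfl
  | cons k f ih =>
      intro i j
      by_cases hk : (k == 0) = true
      · simp [canonW, hk, ih]
      · simp [canonW, hk, ih]

theorem canonW_inj (l1 l2 : List Char) (f g : List Int) (i j : Nat)
    (h : canonW l1 l2 f i j = canonW l1 l2 g i j) : f = g := by
  have := congrArg (List.map (fun x : Char × Int => x.2)) h
  rwa [map_snd_canonW, map_snd_canonW] at this

theorem mem_canonW_fst (l1 l2 : List Char) :
    ∀ (f : List Int) (i j : Nat), (∀ k ∈ f, k = 0 ∨ k = 1) →
    f.count 0 ≤ l1.length - i → f.count 1 ≤ l2.length - j →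
    ∀ x ∈ canonW l1 l2 f i j, x.1 ∈ l1 ∨ x.1 ∈ l2 := by
  intro f
  induction f with
  | nil => intro i j _ _ _ x hx; simp [canonW] at hx
  | cons k f ih =>
      intro i j hks h0 h1 x hx
      rcases hks k (by simp) with rfl | rfl
      · rw [List.count_cons_self] at h0
        rw [List.count_cons_of_ne (by norm_num)] at h1
        have hi : i < l1.length := by omega
        simp [canonW] at hx
        rcases hx with rfl | hx
        · left
          simp [List.getElem?_eq_getElem hi]
        · exact ih (i + 1) j (fun y hy => hks y (by simp [hy])) (by omega) h1 x hx
      · rw [List.count_cons_of_ne (by norm_num)] at h0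
        rw [List.count_cons_self] at h1
        have hj : j < l2.length := by omega
        simp [canonW] at hx
        rcases hx with rfl | hx
        · right
          simp [List.getElem?_eq_getElem hj]
        · exact ih i (j + 1) (fun y hy => hks y (by simp [hy])) h0 (by omega) x hx

-- A's per-pass walk only reads the flags of the sorted interleave
theorem stepA_walk (l1 l2 : List Char) :
    ∀ (s : List (Char × Int)) (i j : Nat) (acc : List (Char × Int)),
    (s.foldl
      (fun (st : Nat × Nat × List (Char × Int)) ck =>
        if ck.2 == 0 then
          (st.1 + 1, st.2.1, st.2.2 ++ [(PySem.List.pyGetD l1 (Int.ofNat st.1) ' ', ck.2)])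
        else
          (st.1, st.2.1 + 1, st.2.2 ++ [(PySem.List.pyGetD l2 (Int.ofNat st.2.1) ' ', ck.2)]))
      (i, j, acc)).2.2
      = acc ++ canonW l1 l2 (s.map (fun x => x.2)) i j := by
  intro s
  induction s with
  | nil => intro i j acc; simp [canonW]
  | cons ck s ih =>
      intro i j acc
      by_cases hk : (ck.2 == 0) = true
      · simp only [List.foldl_cons, hk, if_true, List.map_cons]
        rw [ih]
        simp [canonW, hk]
      · simp only [List.foldl_cons, List.map_cons, if_neg hk]
        rw [ih]
        simp [canonW, hk]

theorem stepA_eq_canon (l1 l2 : List Char) (itl : List (Char × Int)) :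
    stepA l1 l2 itl
      = canonW l1 l2 ((PySem.List.sorted itl (fun x => x.1) false).map (fun x => x.2)) 0 0 := by
  unfold stepA
  rw [stepA_walk]
  simp

theorem mergeVals_cons_left (Z O : List Int) (t : Int) (h : ∀ y ∈ O, t < y) :
    mergeVals (t :: Z) O = 0 :: mergeVals Z O := by
  cases O with
  | nil => cases Z <;> simp [mergeVals, List.replicate_succ]
  | cons y os => simp [mergeVals, h y (by simp)]

theorem mergeVals_cons_right (Z O : List Int) (t : Int) (h : ∀ x ∈ Z, t ≤ x) :
    mergeVals Z (t :: O) = 1 :: mergeVals Z O := by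
  cases Z with
  | nil => simp [mergeVals, List.replicate_succ]
  | cons x zs =>
      have : ¬ (x < t) := by have := h x (by simp); omega
      simp [mergeVals, this]

theorem sel_ge (l : List Char) (c : Char) (b : Int) :
    ∀ (f : List Int) (i : Nat) (t : Int), ∀ x ∈ sel l c b f i t, t ≤ x := by
  intro f
  induction f with
  | nil => intro i t x hx; simp [sel] at hx
  | cons k f ih =>
      intro i t x hx
      by_cases hk : (k == b) = true
      · simp only [sel, hk, if_true] at hx
        by_cases hc : (PySem.List.pyGetD l (Int.ofNat i) ' ' == c) = true
        · rw [if_pos hc] at hx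
          rcases List.mem_cons.mp hx with rfl | hx
          · omega
          · have := ih (i + 1) (t + 1) x hx; omega
        · rw [if_neg hc] at hx
          have := ih (i + 1) (t + 1) x hx; omega
      · simp only [sel, if_neg hk] at hx
        have := ih i (t + 1) x hx; omega

-- core per-character lemma: the flags of the char-c block of the sorted interleave
-- are the two-pointer merge of the selected positions
theorem filterL (l1 l2 : List Char) (c : Char) :
    ∀ (f : List Int) (i j : Nat) (t : Int), (∀ k ∈ f, k = 0 ∨ k = 1) →
    ((canonW l1 l2 f i j).filter (fun x => x.1 == c)).map (fun x => x.2)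
      = mergeVals (sel l1 c 0 f i t) (sel l2 c 1 f j t) := by
  intro f
  induction f with
  | nil => intro i j t _; simp [canonW, sel, mergeVals]
  | cons k f ih =>
      intro i j t hk
      rcases hk k (by simp) with rfl | rfl
      · rw [canonW_cons_zero]
        have hsel1 : sel l1 c 0 ((0 : Int) :: f) i t
            = if PySem.List.pyGetD l1 (Int.ofNat i) ' ' == c then t :: sel l1 c 0 f (i + 1) (t + 1)
              else sel l1 c 0 f (i + 1) (t + 1) := by
          simp [sel]
        have hsel2 : sel l2 c 1 ((0 : Int) :: f) j t = sel l2 c 1 f j (t + 1) := by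
          simp [sel]
        rw [hsel1, hsel2]
        by_cases hc : (PySem.List.pyGetD l1 (Int.ofNat i) ' ' == c) = true
        · rw [if_pos hc, List.filter_cons_of_pos (by simpa using hc), List.map_cons]
          rw [mergeVals_cons_left _ _ t (fun y hy => by
            have := sel_ge l2 c 1 f j (t + 1) y hy; omega)]
          rw [ih (i + 1) j (t + 1) (fun y hy => hk y (by simp [hy]))]
        · rw [if_neg hc, List.filter_cons_of_neg (by simpa using hc)]
          exact ih (i + 1) j (t + 1) (fun y hy => hk y (by simp [hy]))
      · rw [canonW_cons_one]
        have hsel1 : sel l1 c 0 ((1 : Int) :: f) i t = sel l1 c 0 f i (t + 1) := by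
          simp [sel]
        have hsel2 : sel l2 c 1 ((1 : Int) :: f) j t
            = if PySem.List.pyGetD l2 (Int.ofNat j) ' ' == c then t :: sel l2 c 1 f (j + 1) (t + 1)
              else sel l2 c 1 f (j + 1) (t + 1) := by
          simp [sel]
        rw [hsel1, hsel2]
        by_cases hc : (PySem.List.pyGetD l2 (Int.ofNat j) ' ' == c) = true
        · rw [if_pos hc, List.filter_cons_of_pos (by simpa using hc), List.map_cons]
          rw [mergeVals_cons_right _ _ t (fun y hy => by
            have := sel_ge l1 c 0 f i (t + 1) y hy; omega)]
          rw [ih i (j + 1) (t + 1) (fun y hy => hk y (by simp [hy]))]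
        · rw [if_neg hc, List.filter_cons_of_neg (by simpa using hc)]
          exact ih i (j + 1) (t + 1) (fun y hy => hk y (by simp [hy]))

theorem occA_eq (c : Char) :
    ∀ (l : List Char) (s : Int),
    ((PySem.List.enumerate l s).filter (fun p => p.2 == c)).map (fun p => p.1) = occA c l s := by
  intro l
  induction l with
  | nil => intro s; simp [PySem.List.enumerate, occA]
  | cons x l ih =>
      intro s
      rw [PySem.List.enumerate_cons]
      by_cases hc : (x == c) = true
      · simp [hc, occA, ih]
      · simp [hc, occA, ih]

theorem mem_occA (c : Char) :
    ∀ (l : List Char) (s : Int), ∀ x ∈ occA c l s, s ≤ x := by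
  intro l
  induction l with
  | nil => intro s x hx; simp [occA] at hx
  | cons y l ih =>
      intro s x hx
      by_cases hc : (y == c) = true
      · simp only [occA, hc, if_true] at hx
        rcases List.mem_cons.mp hx with rfl | hx
        · omega
        · have := ih (s + 1) x hx; omega
      · simp only [occA, if_neg hc] at hx
        have := ih (s + 1) x hx; omega

theorem pyGetD_cons_zero {α : Type} (x : α) (xs : List α) (d : α) :
    PySem.List.pyGetD (x :: xs) 0 d = x := by
  have h := PySem.List.pyGetD_natCast (x :: xs) 0 d
  simpa using h

theorem pyGetD_cons_pos {α : Type} (x : α) (xs : List α) (m : Int) (d : α) (h : 1 ≤ m) :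
    PySem.List.pyGetD (x :: xs) m d = PySem.List.pyGetD xs (m - 1) d := by
  obtain ⟨k, rfl⟩ : ∃ k : Nat, m = ((k + 1 : Nat) : Int) := ⟨m.toNat - 1, by omega⟩
  have h1 : ((k + 1 : Nat) : Int) - 1 = ((k : Nat) : Int) := by omega
  rw [h1, PySem.List.pyGetD_natCast, PySem.List.pyGetD_natCast]
  simp

-- the port's mergeC looks the positions up; mergeVals receives them directly
theorem mergeC_eq (ps qs : List Int) :
    ∀ (zs os : List Int), mergeC ps qs zs os
      = mergeVals (zs.map (fun a => PySem.List.pyGetD ps a 0))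
                  (os.map (fun b => PySem.List.pyGetD qs b 0)) := by
  intro zs os
  fun_induction mergeC ps qs zs os with
  | case1 os => simp [mergeVals]
  | case2 zs h =>
      cases zs with
      | nil => simp [mergeVals]
      | cons a zs => simp [mergeVals]
  | case3 a zs b os h ih => simp [mergeVals, h, ih]
  | case4 a zs b os h ih => simp [mergeVals, h, ih]

-- the looked-up positions of the occurrence ordinals are the selected positions
theorem mapPos (l : List Char) (c : Char) (b : Int) :
    ∀ (f : List Int) (i : Nat) (t : Int), i ≤ l.length → f.count b = l.length - i →
    (occA c (l.drop i) (Int.ofNat i)).map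
        (fun a => PySem.List.pyGetD (posG b f t) (a - Int.ofNat i) 0)
      = sel l c b f i t := by
  intro f
  induction f with
  | nil =>
      intro i t hle hcnt
      simp only [List.count_nil] at hcnt
      have hi : i = l.length := by omega
      rw [hi, List.drop_length]
      simp [occA, sel]
  | cons k f ih =>
      intro i t hle hcnt
      by_cases hkb : (k == b) = true
      · have hkv : k = b := by simpa using hkb
        subst hkv
        rw [List.count_cons_self] at hcnt
        have hi : i < l.length := by omega
        rw [List.drop_eq_getElem_cons hi]
        have hocc : occA c (l[i] :: l.drop (i + 1)) (Int.ofNat i)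
            = if l[i] == c then Int.ofNat i :: occA c (l.drop (i + 1)) (Int.ofNat i + 1)
              else occA c (l.drop (i + 1)) (Int.ofNat i + 1) := by
          simp [occA]
        have hposx : posG k (k :: f) t = t :: posG k f (t + 1) := by simp [posG]
        have hselx : sel l c k (k :: f) i t
            = if PySem.List.pyGetD l (Int.ofNat i) ' ' == c then t :: sel l c k f (i + 1) (t + 1)
              else sel l c k f (i + 1) (t + 1) := by
          simp [sel]
        rw [hocc, hposx, hselx]
        have hcast : Int.ofNat i + 1 = Int.ofNat (i + 1) := rfl
        have hcast2 : ∀ a : Int, Int.ofNat (i + 1) ≤ a → (1 : Int) ≤ a - Int.ofNat i := by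
          intro a h
          rw [← hcast] at h
          omega
        by_cases hc : (l[i] == c) = true
        · rw [if_pos hc, if_pos (by rw [pyGetD_natAt l i hi]; exact hc), List.map_cons]
          congr 1
          · have h0 : Int.ofNat i - Int.ofNat i = 0 := by omega
            rw [h0, pyGetD_cons_zero]
          · rw [hcast, ← ih (i + 1) (t + 1) (by omega) (by omega)]
            apply List.map_congr_left
            intro a ha
            have h1 : Int.ofNat (i + 1) ≤ a := mem_occA c _ _ a ha
            rw [pyGetD_cons_pos _ _ _ _ (hcast2 a h1)]
            congr 1
            rw [← hcast]
            omega
        · rw [if_neg hc, if_neg (by rw [pyGetD_natAt l i hi]; exact hc)]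
          rw [hcast, ← ih (i + 1) (t + 1) (by omega) (by omega)]
          apply List.map_congr_left
          intro a ha
          have h1 : Int.ofNat (i + 1) ≤ a := mem_occA c _ _ a ha
          rw [pyGetD_cons_pos _ _ _ _ (hcast2 a h1)]
          congr 1
          rw [← hcast]
          omega
      · have hne : k ≠ b := by simpa using hkb
        have hsel : sel l c b (k :: f) i t = sel l c b f i (t + 1) := by
          simp [sel, hne]
        have hpos : posG b (k :: f) t = posG b f (t + 1) := by
          simp [posG, hne]
        rw [List.count_cons_of_ne (by simpa using hkb)] at hcnt
        rw [hsel, hpos]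
        exact ih i (t + 1) hle hcnt

theorem posFold :
    ∀ (f : List Int), (∀ k ∈ f, k = 0 ∨ k = 1) → ∀ (t : Int) (A B : List Int),
    (PySem.List.enumerate f t).foldl
      (fun (pr : List Int × List Int) tk =>
        if tk.2 == 0 then (pr.1 ++ [tk.1], pr.2) else (pr.1, pr.2 ++ [tk.1]))
      (A, B)
      = (A ++ posG 0 f t, B ++ posG 1 f t) := by
  intro f
  induction f with
  | nil => intro _ t A B; simp [PySem.List.enumerate, posG]
  | cons k f ih =>
      intro hk t A B
      rw [PySem.List.enumerate_cons, List.foldl_cons]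
      rcases hk k (by simp) with rfl | rfl
      · rw [if_pos (show (((t, (0 : Int)).2 == 0) = true) by norm_num)]
        rw [ih (fun y hy => hk y (by simp [hy])) (t + 1)]
        simp [posG]
      · rw [if_neg (show ¬ (((t, (1 : Int)).2 == 0) = true) by norm_num)]
        rw [ih (fun y hy => hk y (by simp [hy])) (t + 1)]
        simp [posG]

theorem flatMap_filter_of_nil {α β : Type} (l : List α) (p : α → Bool) (g : α → List β)
    (h : ∀ x ∈ l, p x = false → g x = []) : l.flatMap g = (l.filter p).flatMap g := by
  induction l with
  | nil => rfl
  | cons x xs ih =>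
      by_cases hp : p x = true
      · rw [List.flatMap_cons, ih (fun y hy => h y (by simp [hy])), List.filter_cons_of_pos hp,
          List.flatMap_cons]
      · have hnil := h x (by simp) (by simpa using hp)
        rw [List.flatMap_cons, hnil, List.nil_append, ih (fun y hy => h y (by simp [hy])),
          List.filter_cons_of_neg (by simpa using hp)]

theorem alphabet_eq (S : List Char) (hS : ∀ c ∈ S, c.toNat < 256) (hnd : S.Nodup) :
    PySem.List.sorted S (fun x => x) false
      = ((List.range 256).filter (fun n => decide (Char.ofNat n ∈ S))).map Char.ofNat := by
  apply PySem.List.sorted_eq_of_perm_of_pairwise_lt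
  · refine (List.perm_ext_iff_of_nodup ?_ hnd).mpr ?_
    · refine List.Nodup.map_on ?_ (List.Nodup.filter _ List.nodup_range)
      intro a ha b hb hab
      have ha' : a < 256 := List.mem_range.mp (List.mem_filter.mp ha).1
      have hb' : b < 256 := List.mem_range.mp (List.mem_filter.mp hb).1
      have := congrArg Char.toNat hab
      rwa [toNat_ofNat_lt ha', toNat_ofNat_lt hb'] at this
    · intro c
      constructor
      · intro hc
        obtain ⟨n, hn, rfl⟩ := List.mem_map.mp hc
        have := (List.mem_filter.mp hn).2
        simpa using this
      · intro hc
        refine List.mem_map.mpr ⟨c.toNat, ?_, Char.ofNat_toNat c⟩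
        refine List.mem_filter.mpr ⟨List.mem_range.mpr (hS c hc), ?_⟩
        rw [Char.ofNat_toNat]
        simpa using hc
  · rw [List.pairwise_map]
    refine List.Pairwise.imp_of_mem ?_ (List.Pairwise.filter _ List.pairwise_lt_range)
    intro a b ha hb hab
    have ha' : a < 256 := List.mem_range.mp (List.mem_filter.mp ha).1
    have hb' : b < 256 := List.mem_range.mp (List.mem_filter.mp hb).1
    rw [char_lt_iff, toNat_ofNat_lt ha', toNat_ofNat_lt hb']
    exact hab

-- the flag sequence produced by one pass of A
theorem pass_eq (l1 l2 : List Char) (f : List Int)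
    (h1 : ∀ c ∈ l1, c.toNat < 256) (h2 : ∀ c ∈ l2, c.toNat < 256)
    (hk : ∀ k ∈ f, k = 0 ∨ k = 1) (c0 : f.count 0 = l1.length) (c1 : f.count 1 = l2.length) :
    (PySem.List.sorted (canonW l1 l2 f 0 0) (fun x => x.1) false).map (fun x => x.2)
      = passB
          ((PySem.List.sorted (PySem.Set.ofList (l1 ++ l2)) (fun x => x) false).map
            (fun c => ((PySem.List.enumerate l1 0).filter (fun p => p.2 == c)).map (fun p => p.1)))
          ((PySem.List.sorted (PySem.Set.ofList (l1 ++ l2)) (fun x => x) false).map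
            (fun c => ((PySem.List.enumerate l2 0).filter (fun p => p.2 == c)).map (fun p => p.1)))
          f := by
  have hSmem : ∀ c ∈ PySem.Set.ofList (l1 ++ l2), c.toNat < 256 := by
    intro c hc
    rcases List.mem_append.mp ((PySem.Set.mem_ofList _ _).mp hc) with h | h
    · exact h1 c h
    · exact h2 c h
  have hmemf : ∀ x ∈ canonW l1 l2 f 0 0, x.1 ∈ l1 ∨ x.1 ∈ l2 :=
    mem_canonW_fst l1 l2 f 0 0 hk (by omega) (by omega)
  have hchars : ∀ x ∈ canonW l1 l2 f 0 0, x.1.toNat < 256 := by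
    intro x hx
    rcases hmemf x hx with h | h
    · exact h1 _ h
    · exact h2 _ h
  -- the common value: per character of the alphabet, the flags of its block
  have hR : passB
        ((PySem.List.sorted (PySem.Set.ofList (l1 ++ l2)) (fun x => x) false).map
          (fun c => ((PySem.List.enumerate l1 0).filter (fun p => p.2 == c)).map (fun p => p.1)))
        ((PySem.List.sorted (PySem.Set.ofList (l1 ++ l2)) (fun x => x) false).map
          (fun c => ((PySem.List.enumerate l2 0).filter (fun p => p.2 == c)).map (fun p => p.1)))
        f
      = (PySem.List.sorted (PySem.Set.ofList (l1 ++ l2)) (fun x => x) false).flatMap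
          (fun c => mergeVals (sel l1 c 0 f 0 0) (sel l2 c 1 f 0 0)) := by
    unfold passB
    rw [posFold f hk 0 [] []]
    simp only [List.nil_append, List.zip_map']
    rw [PySem.List.foldl_append_eq_flatMap, List.nil_append, List.flatMap_map]
    apply List.flatMap_congr
    intro c _
    simp only [occA_eq c l1 0, occA_eq c l2 0, mergeC_eq]
    have hm1 := mapPos l1 c 0 f 0 0 (by omega) (by omega)
    have hm2 := mapPos l2 c 1 f 0 0 (by omega) (by omega)
    have h00 : Int.ofNat 0 = (0 : Int) := rfl
    rw [List.drop_zero, h00] at hm1 hm2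
    simp only [sub_zero] at hm1 hm2
    rw [hm1, hm2]
  have hL : (PySem.List.sorted (canonW l1 l2 f 0 0) (fun x => x.1) false).map (fun x => x.2)
      = (PySem.List.sorted (PySem.Set.ofList (l1 ++ l2)) (fun x => x) false).flatMap
          (fun c => mergeVals (sel l1 c 0 f 0 0) (sel l2 c 1 f 0 0)) := by
    rw [sorted_eq_pvF _ hchars, pvF, List.map_flatMap]
    have hcongr1 : (List.range 256).flatMap
          (fun n => ((canonW l1 l2 f 0 0).filter (fun x => x.1.toNat == n)).map (fun x => x.2))
        = (List.range 256).flatMap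
          (fun n => ((canonW l1 l2 f 0 0).filter (fun x => x.1 == Char.ofNat n)).map (fun x => x.2)) := by
      apply List.flatMap_congr
      intro n hn
      have hn' : n < 256 := List.mem_range.mp hn
      congr 1
      apply List.filter_congr
      intro x _
      by_cases h : x.1.toNat = n
      · have hx : x.1 = Char.ofNat n := by rw [← h, Char.ofNat_toNat]
        simp [hx, toNat_ofNat_lt hn']
      · have hx : x.1 ≠ Char.ofNat n := fun he => h (by rw [he, toNat_ofNat_lt hn'])
        simp [h, hx]
    rw [hcongr1]
    rw [flatMap_filter_of_nil (List.range 256)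
      (fun n => decide (Char.ofNat n ∈ PySem.Set.ofList (l1 ++ l2)))
      _ ?side]
    case side =>
      intro n _ hp
      have hnot : Char.ofNat n ∉ PySem.Set.ofList (l1 ++ l2) := by simpa using hp
      have : (canonW l1 l2 f 0 0).filter (fun x => x.1 == Char.ofNat n) = [] := by
        rw [List.filter_eq_nil_iff]
        intro x hx hbeq
        apply hnot
        rw [PySem.Set.mem_ofList, List.mem_append]
        have : x.1 = Char.ofNat n := by simpa using hbeq
        rw [← this]
        exact hmemf x hx
      rw [this, List.map_nil]
    rw [alphabet_eq (PySem.Set.ofList (l1 ++ l2)) hSmem (PySem.Set.nodup_ofList _),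
      List.flatMap_map]
    apply List.flatMap_congr
    intro n _
    exact filterL l1 l2 (Char.ofNat n) f 0 0 0 hk
  rw [hL, hR]

theorem FlagInv_pass (l1 l2 : List Char) (f : List Int) (h : FlagInv l1.length l2.length f) :
    FlagInv l1.length l2.length
      ((PySem.List.sorted (canonW l1 l2 f 0 0) (fun x => x.1) false).map (fun x => x.2)) := by
  obtain ⟨hk, c0, c1⟩ := h
  have hperm : ((PySem.List.sorted (canonW l1 l2 f 0 0) (fun x => x.1) false).map
      (fun x => x.2)).Perm f := by
    have := (PySem.List.sorted_perm (canonW l1 l2 f 0 0) (fun x => x.1) false).map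
      (fun x : Char × Int => x.2)
    rwa [map_snd_canonW] at this
  refine ⟨fun k hkm => hk k (hperm.mem_iff.mp hkm), ?_, ?_⟩
  · rw [hperm.count_eq]; exact c0
  · rw [hperm.count_eq]; exact c1

theorem loop_eq (l1 l2 : List Char)
    (h1 : ∀ c ∈ l1, c.toNat < 256) (h2 : ∀ c ∈ l2, c.toNat < 256) :
    ∀ (p : Nat) (f : List Int), FlagInv l1.length l2.length f →
    loopA l1 l2 p (canonW l1 l2 f 0 0)
      = canonW l1 l2
          (loopB
            ((PySem.List.sorted (PySem.Set.ofList (l1 ++ l2)) (fun x => x) false).map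
              (fun c => ((PySem.List.enumerate l1 0).filter (fun p => p.2 == c)).map (fun p => p.1)))
            ((PySem.List.sorted (PySem.Set.ofList (l1 ++ l2)) (fun x => x) false).map
              (fun c => ((PySem.List.enumerate l2 0).filter (fun p => p.2 == c)).map (fun p => p.1)))
            p f) 0 0 := by
  intro p
  induction p with
  | zero => intro f _; rfl
  | succ p ih =>
      intro f hInv
      obtain ⟨hk, c0, c1⟩ := hInv
      have hpass := pass_eq l1 l2 f h1 h2 hk c0 c1
      set O1 := (PySem.List.sorted (PySem.Set.ofList (l1 ++ l2)) (fun x => x) false).map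
        (fun c => ((PySem.List.enumerate l1 0).filter (fun p => p.2 == c)).map (fun p => p.1)) with hO1
      set O2 := (PySem.List.sorted (PySem.Set.ofList (l1 ++ l2)) (fun x => x) false).map
        (fun c => ((PySem.List.enumerate l2 0).filter (fun p => p.2 == c)).map (fun p => p.1)) with hO2
      have hA : loopA l1 l2 (p + 1) (canonW l1 l2 f 0 0)
          = (if stepA l1 l2 (canonW l1 l2 f 0 0) = canonW l1 l2 f 0 0 then canonW l1 l2 f 0 0
             else loopA l1 l2 p (stepA l1 l2 (canonW l1 l2 f 0 0))) := rfl
      have hB : loopB O1 O2 (p + 1) f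
          = (if passB O1 O2 f = f then f else loopB O1 O2 p (passB O1 O2 f)) := rfl
      rw [hA, hB, stepA_eq_canon]
      have hg : (PySem.List.sorted (canonW l1 l2 f 0 0) (fun x => x.1) false).map (fun x => x.2)
          = passB O1 O2 f := hpass
      have hInv' : FlagInv l1.length l2.length (passB O1 O2 f) := by
        rw [← hg]
        exact FlagInv_pass l1 l2 f ⟨hk, c0, c1⟩
      by_cases hfix : passB O1 O2 f = f
      · rw [if_pos (by rw [hg, hfix]), if_pos hfix]
      · rw [if_neg ?hcond, if_neg hfix]
        · rw [hg]
          exact ih (passB O1 O2 f) hInv'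
        case hcond =>
          intro he
          exact hfix (by rw [← hg]; exact canonW_inj l1 l2 _ f 0 0 he)

theorem canon_init (l1 l2 : List Char) :
    canonW l1 l2 (List.replicate l1.length (0 : Int) ++ List.replicate l2.length (1 : Int)) 0 0
      = l1.map (fun c => (c, (0 : Int))) ++ l2.map (fun c => (c, (1 : Int))) := by
  have ones : ∀ (l : List Char) (j i : Nat), l = l2.drop j →
      canonW l1 l2 (List.replicate l.length (1 : Int)) i j = l.map (fun c => (c, (1 : Int))) := by
    intro l
    induction l with
    | nil => intro j i _; rfl
    | cons c l ih =>
        intro j i hd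
        have hj : j < l2.length := by
          by_contra h
          rw [List.drop_eq_nil_of_le (by omega)] at hd
          simp at hd
        rw [List.drop_eq_getElem_cons hj] at hd
        have hc : c = l2[j] := by injection hd
        have hl : l = l2.drop (j + 1) := by injection hd
        rw [List.length_cons, List.replicate_succ, canonW_cons_one]
        rw [ih (j + 1) i hl]
        rw [pyGetD_natAt l2 j hj, hc]
        simp
  have zeros : ∀ (l : List Char) (i j : Nat) (f : List Int), l = l1.drop i →
      canonW l1 l2 (List.replicate l.length (0 : Int) ++ f) i j
        = l.map (fun c => (c, (0 : Int))) ++ canonW l1 l2 f (i + l.length) j := by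
    intro l
    induction l with
    | nil => intro i j f _; simp
    | cons c l ih =>
        intro i j f hd
        have hi : i < l1.length := by
          by_contra h
          rw [List.drop_eq_nil_of_le (by omega)] at hd
          simp at hd
        rw [List.drop_eq_getElem_cons hi] at hd
        have hc : c = l1[i] := by injection hd
        have hl : l = l1.drop (i + 1) := by injection hd
        rw [List.length_cons, List.replicate_succ, List.cons_append, canonW_cons_zero]
        rw [ih (i + 1) j f hl]
        rw [pyGetD_natAt l1 i hi, hc]
        simp only [List.map_cons, List.cons_append]
        have : i + (l.length + 1) = i + 1 + l.length := by omega
        rw [this]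
  have h1 := zeros l1 0 0 (List.replicate l2.length (1 : Int)) (List.drop_zero).symm
  have h2 := ones l2 0 l1.length (List.drop_zero).symm
  rw [h1, Nat.zero_add, h2]

theorem expand_eq (l1 l2 : List Char) :
    ∀ (f : List Int) (acc : List Char) (i j : Nat),
    (f.foldl
      (fun (st : List Char × Nat × Nat) k =>
        if k == 0 then
          (st.1 ++ [PySem.List.pyGetD l1 (Int.ofNat st.2.1) ' '], st.2.1 + 1, st.2.2)
        else
          (st.1 ++ [PySem.List.pyGetD l2 (Int.ofNat st.2.2) ' '], st.2.1, st.2.2 + 1))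
      (acc, i, j)).1
      = acc ++ (canonW l1 l2 f i j).map (fun x => x.1) := by
  intro f
  induction f with
  | nil => intro acc i j; simp [canonW]
  | cons k f ih =>
      intro acc i j
      rw [List.foldl_cons]
      by_cases hk : (k == 0) = true
      · simp only [if_pos hk]
        rw [ih]
        simp [canonW, hk]
      · simp only [if_neg hk]
        rw [ih]
        simp [canonW, hk]

-- ===== VERDICT (by name: the statement is the Claim_ definition above) =====
theorem mergeBWT_spec : Claim_equal_mergeBWT := by
  intro bwt1 bwt2 hdom
  unfold Spec_mergeBWT
  simp only [mergeBWT, mergeBWT_alt]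
  have hd : (pvDomStr bwt1 && pvDomStr bwt2) = true := hdom
  have h1 : ∀ c ∈ bwt1.toList, c.toNat < 256 := by
    intro c hc
    have := (List.all_eq_true.mp (show (bwt1.toList.all pvDomChar) = true from Bool.and_elim_left hd)) c hc
    simp only [pvDomChar, Bool.or_eq_true, Bool.and_eq_true, decide_eq_true_eq, beq_iff_eq] at this
    omega
  have h2 : ∀ c ∈ bwt2.toList, c.toNat < 256 := by
    intro c hc
    have := (List.all_eq_true.mp (show (bwt2.toList.all pvDomChar) = true from Bool.and_elim_right hd)) c hc
    simp only [pvDomChar, Bool.or_eq_true, Bool.and_eq_true, decide_eq_true_eq, beq_iff_eq] at this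
    omega
  have hInv : FlagInv bwt1.toList.length bwt2.toList.length
      (List.replicate bwt1.toList.length (0 : Int) ++ List.replicate bwt2.toList.length (1 : Int)) := by
    refine ⟨?_, ?_, ?_⟩
    · intro k hk
      rcases List.mem_append.mp hk with h | h
      · left; exact List.eq_of_mem_replicate h
      · right; exact List.eq_of_mem_replicate h
    · simp [List.count_append, List.count_replicate]
    · simp [List.count_append, List.count_replicate]
  rw [← canon_init bwt1.toList bwt2.toList]
  rw [loop_eq bwt1.toList bwt2.toList h1 h2 (min bwt1.toList.length bwt2.toList.length) _ hInv]
  congr 1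
  unfold expandB
  rw [expand_eq bwt1.toList bwt2.toList _ [] 0 0]
  simp
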